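-- pv_equiv track=rewrite | github.com/TylerRConger/TSP | TSP Code.py | convert_to_symmetric_matrix
-- ===== SOURCE A (Python) =====
-- def convert_to_symmetric_matrix(input_array):
--     """
--     Convert a array of arrays representing an upper triangular matrix into a symmetric matrix
--
--     Arguments:
--         input_array (array): A array of arrays representing an upper triangular matrix where each inner array contains the elements of a row
--
--     Returns:
--         array: A 2-D array of the symmetric matrix
--     """
--     n = len(input_array)
--     symmetric_matrix = [[0] * n for _ in range(n)]  # Initialize symmetric matrix with zeros
--
--     # Fill in the upper triangular part of the symmetric matrix
--     for i in range(n):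
--         for j in range(i+1, n):
--             symmetric_matrix[i][j] = input_array[j][i]
--
--     # Fill in the lower triangular part by transposing the upper triangular part
--     for i in range(n):
--         for j in range(i+1, n):
--             symmetric_matrix[j][i] = symmetric_matrix[i][j]
--
--     return symmetric_matrix
-- ===== SOURCE B (Python) =====
-- def convert_to_symmetric_matrix(input_array):
--     n = len(input_array)
--     return [[0 if i == j else input_array[max(i, j)][min(i, j)] for j in range(n)]
--             for i in range(n)]
-- ===== Notes on version B (the rewrite author's own statement) =====
-- stated objective: simpler
-- what changed: B computes each cell directly in one nested comprehension (0 on the diagonal, input_array[max(i,j)][min(i,j)] off it) instead of allocating a zero matrix and mutating it in two separate triangular passes.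
import Mathlib
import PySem

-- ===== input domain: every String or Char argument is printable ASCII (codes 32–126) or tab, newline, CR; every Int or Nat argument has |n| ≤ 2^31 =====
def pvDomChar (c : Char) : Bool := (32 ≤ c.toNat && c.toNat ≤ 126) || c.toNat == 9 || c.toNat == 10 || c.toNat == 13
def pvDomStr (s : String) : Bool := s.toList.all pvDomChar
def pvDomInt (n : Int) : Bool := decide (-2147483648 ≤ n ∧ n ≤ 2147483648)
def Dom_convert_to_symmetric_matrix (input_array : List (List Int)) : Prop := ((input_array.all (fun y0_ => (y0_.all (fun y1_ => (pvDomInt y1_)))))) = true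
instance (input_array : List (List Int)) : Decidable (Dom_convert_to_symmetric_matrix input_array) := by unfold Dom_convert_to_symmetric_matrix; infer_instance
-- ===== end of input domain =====

-- B replaces A's allocate-zeros-then-two-triangular-mutation-passes with a single
-- nested comprehension computing each cell directly (objective: simpler).

-- ===== PORT A =====
-- symmetric_matrix[i][j] = v  (i, j are Nat indices produced by range, always in range here)
def pvSetCell (m : List (List Int)) (i j : Nat) (v : Int) : List (List Int) :=
  m.set i ((m.getD i []).set j v)

def convert_to_symmetric_matrix (input_array : List (List Int)) : List (List Int) :=
  let n := input_array.length
  -- [[0] * n for _ in range(n)]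
  let sym0 := List.replicate n (List.replicate n (0 : Int))
  -- first pass: for i in range(n): for j in range(i+1, n): sym[i][j] = input_array[j][i]
  -- (row/element reads use getD; under Pre_ every index read by the Python is in range)
  let sym1 := (List.range n).foldl (fun m i =>
    (List.range' (i+1) (n - (i+1))).foldl (fun m j =>
      pvSetCell m i j ((input_array.getD j []).getD i 0)) m) sym0
  -- second pass: for i in range(n): for j in range(i+1, n): sym[j][i] = sym[i][j]
  (List.range n).foldl (fun m i =>
    (List.range' (i+1) (n - (i+1))).foldl (fun m j =>
      pvSetCell m j i ((m.getD i []).getD j 0)) m) sym1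

-- ===== PORT B =====
def convert_to_symmetric_matrix_alt (input_array : List (List Int)) : List (List Int) :=
  let n := input_array.length
  (List.range n).map (fun i => (List.range n).map (fun j =>
    if i = j then 0 else (input_array.getD (max i j) []).getD (min i j) 0))

-- ===== PRECONDITION & SPEC =====
-- Pre_ excludes exactly the inputs where the Python A raises IndexError: row j is
-- indexed at columns 0..j-1, so each row j must have length ≥ j.
def Pre_convert_to_symmetric_matrix (input_array : List (List Int)) : Prop :=
  ∀ j < input_array.length, j ≤ (input_array.getD j []).length
instance (input_array : List (List Int)) : Decidable (Pre_convert_to_symmetric_matrix input_array) := by unfold Pre_convert_to_symmetric_matrix; infer_instance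

def pvWitness_convert_to_symmetric_matrix : List (List Int) := [[7], [1], [2, 3]]

def Spec_convert_to_symmetric_matrix (input_array : List (List Int)) (out : List (List Int)) : Prop := out = convert_to_symmetric_matrix_alt input_array
instance (input_array : List (List Int)) (out : List (List Int)) : Decidable (Spec_convert_to_symmetric_matrix input_array out) := by unfold Spec_convert_to_symmetric_matrix; infer_instance

-- ===== CLAIM (what is proved, stated in full; the proofs are below) =====
def Claim_equal_convert_to_symmetric_matrix : Prop := ∀ (input_array : List (List Int)), Dom_convert_to_symmetric_matrix input_array → Pre_convert_to_symmetric_matrix input_array → Spec_convert_to_symmetric_matrix input_array (convert_to_symmetric_matrix input_array)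

-- ===== LEMMAS AND PROOFS =====

-- the matrix whose (i,j) entry is f i j, as an n×n list of lists
def pvMat (n : Nat) (f : Nat → Nat → Int) : List (List Int) :=
  (List.range n).map (fun i => (List.range n).map (f i))

theorem pvMat_congr {n : Nat} {f g : Nat → Nat → Int}
    (h : ∀ a b, a < n → b < n → f a b = g a b) : pvMat n f = pvMat n g := by
  unfold pvMat
  refine List.map_congr_left (fun a ha => ?_)
  refine List.map_congr_left (fun b hb => ?_)
  exact h a b (List.mem_range.mp ha) (List.mem_range.mp hb)

theorem pvRow_set {α : Type} {n : Nat} (g : Nat → α) (i : Nat) (x : α) (_hi : i < n) :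
    ((List.range n).map g).set i x = (List.range n).map (fun k => if k = i then x else g k) := by
  apply List.ext_getElem
  · simp
  · intro k h1 h2
    simp only [List.getElem_set, List.getElem_map, List.getElem_range]
    simp only [List.length_set, List.length_map, List.length_range] at h1
    by_cases hk : i = k
    · subst hk; simp
    · simp [hk, show k ≠ i from fun h => hk h.symm]

theorem pvMat_getD {n : Nat} (f : Nat → Nat → Int) (i : Nat) (hi : i < n) :
    (pvMat n f).getD i [] = (List.range n).map (f i) := by
  unfold pvMat
  rw [List.getD_eq_getElem?_getD, List.getElem?_map]
  simp [hi]

theorem pvRow_getD {n : Nat} (g : Nat → Int) (j : Nat) (hj : j < n) :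
    ((List.range n).map g).getD j 0 = g j := by
  rw [List.getD_eq_getElem?_getD, List.getElem?_map]
  simp [hj]

theorem pvSetCell_mat {n : Nat} (f : Nat → Nat → Int) (i j : Nat) (v : Int)
    (hi : i < n) (hj : j < n) :
    pvSetCell (pvMat n f) i j v =
      pvMat n (fun a b => if a = i ∧ b = j then v else f a b) := by
  unfold pvSetCell
  rw [pvMat_getD f i hi, pvRow_set (f i) j v hj]
  unfold pvMat
  rw [pvRow_set (fun i' => (List.range n).map (f i')) i _ hi]
  refine List.map_congr_left (fun a _ => ?_)
  by_cases ha : a = i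
  · subst ha
    simp only []
    refine List.map_congr_left (fun b _ => ?_)
    by_cases hb : b = j <;> simp [hb]
  · simp only [if_neg ha]
    refine List.map_congr_left (fun b _ => ?_)
    simp [ha]

-- first pass, inner loop
theorem pvLoop1_inner {n : Nat} (g : Nat → Int) (i : Nat) (hi : i < n) :
    ∀ (len s : Nat) (f : Nat → Nat → Int), s + len ≤ n →
    (List.range' s len).foldl (fun m j => pvSetCell m i j (g j)) (pvMat n f) =
      pvMat n (fun a b => if a = i ∧ s ≤ b ∧ b < s + len then g b else f a b) := by
  intro len
  induction len with
  | zero =>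
    intro s f _
    simp only [List.range', List.foldl_nil]
    exact pvMat_congr (fun a b _ _ => (if_neg (by omega)).symm)
  | succ len ih =>
    intro s f hs
    rw [List.range'_succ, List.foldl_cons,
      pvSetCell_mat f i s (g s) hi (by omega),
      ih (s+1) _ (by omega)]
    refine pvMat_congr (fun a b _ _ => ?_)
    by_cases h2 : a = i ∧ b = s
    · obtain ⟨ha, hb⟩ := h2
      subst ha; subst hb
      rw [if_neg (by omega), if_pos ⟨rfl, rfl⟩, if_pos ⟨rfl, by omega, by omega⟩]
    · by_cases h1 : a = i ∧ s + 1 ≤ b ∧ b < s + 1 + len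
      · rw [if_pos h1, if_pos ⟨h1.1, by omega, by omega⟩]
      · rw [if_neg h1, if_neg h2, if_neg (by omega)]

-- first pass, outer loop
theorem pvLoop1_outer {n : Nat} (g : Nat → Nat → Int) :
    ∀ (k s : Nat), s + k ≤ n →
    (List.range' s k).foldl (fun m i =>
        (List.range' (i+1) (n - (i+1))).foldl (fun m j => pvSetCell m i j (g i j)) m)
      (pvMat n (fun a b => if a < s ∧ a < b ∧ b < n then g a b else 0)) =
      pvMat n (fun a b => if a < s + k ∧ a < b ∧ b < n then g a b else 0) := by
  intro k
  induction k with
  | zero => intro s _; simp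
  | succ k ih =>
    intro s hs
    rw [List.range'_succ, List.foldl_cons,
      pvLoop1_inner (g s) s (by omega) (n - (s+1)) (s+1) _ (by omega)]
    have heq : pvMat n (fun a b => if a = s ∧ s + 1 ≤ b ∧ b < s + 1 + (n - (s+1)) then g s b
          else if a < s ∧ a < b ∧ b < n then g a b else 0) =
        pvMat n (fun a b => if a < s + 1 ∧ a < b ∧ b < n then g a b else 0) := by
      refine pvMat_congr (fun a b ha hb => ?_)
      by_cases h1 : a = s ∧ s + 1 ≤ b ∧ b < s + 1 + (n - (s+1))
      · obtain ⟨haa, hbb⟩ := h1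
        subst haa
        rw [if_pos ⟨rfl, hbb⟩, if_pos ⟨by omega, by omega, by omega⟩]
      · rw [if_neg h1]
        by_cases h2 : a < s ∧ a < b ∧ b < n
        · rw [if_pos h2, if_pos ⟨by omega, h2.2.1, h2.2.2⟩]
        · rw [if_neg h2, if_neg (by omega)]
    rw [heq, ih (s+1) (by omega)]
    exact pvMat_congr (fun a b _ _ => by rw [show s + 1 + k = s + (k+1) by omega])

-- second pass, inner loop (writes go strictly below the read row i)
theorem pvLoop2_inner {n : Nat} (i : Nat) (hi : i < n) :
    ∀ (len s : Nat) (f : Nat → Nat → Int), i < s → s + len ≤ n →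
    (List.range' s len).foldl (fun m j => pvSetCell m j i ((m.getD i []).getD j 0)) (pvMat n f) =
      pvMat n (fun a b => if b = i ∧ s ≤ a ∧ a < s + len then f i a else f a b) := by
  intro len
  induction len with
  | zero =>
    intro s f _ _
    simp only [List.range', List.foldl_nil]
    exact pvMat_congr (fun a b _ _ => (if_neg (by omega)).symm)
  | succ len ih =>
    intro s f his hs
    rw [List.range'_succ, List.foldl_cons, pvMat_getD f i hi,
      pvRow_getD (f i) s (by omega),
      pvSetCell_mat f s i (f i s) (by omega) hi,
      ih (s+1) _ (by omega) (by omega)]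
    refine pvMat_congr (fun a b _ _ => ?_)
    by_cases h2 : a = s ∧ b = i
    · obtain ⟨ha, hb⟩ := h2
      subst ha; subst hb
      rw [if_neg (by omega), if_pos ⟨rfl, rfl⟩, if_pos ⟨rfl, by omega, by omega⟩]
    · by_cases h1 : b = i ∧ s + 1 ≤ a ∧ a < s + 1 + len
      · rw [if_pos h1, if_neg (by omega), if_pos ⟨h1.1, by omega, by omega⟩]
      · rw [if_neg h1, if_neg h2, if_neg (by omega)]

-- second pass, outer loop: invariant after outer indices [0, t)
theorem pvLoop2_outer {n : Nat} (f1 : Nat → Nat → Int) :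
    ∀ (k s : Nat), s + k ≤ n →
    (List.range' s k).foldl (fun m i =>
        (List.range' (i+1) (n - (i+1))).foldl
          (fun m j => pvSetCell m j i ((m.getD i []).getD j 0)) m)
      (pvMat n (fun a b => if b < a ∧ b < s then f1 b a else f1 a b)) =
      pvMat n (fun a b => if b < a ∧ b < s + k then f1 b a else f1 a b) := by
  intro k
  induction k with
  | zero => intro s _; simp
  | succ k ih =>
    intro s hs
    rw [List.range'_succ, List.foldl_cons,
      pvLoop2_inner s (by omega) (n - (s+1)) (s+1) _ (by omega) (by omega)]
    have heq : pvMat n (fun a b =>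
          if b = s ∧ s + 1 ≤ a ∧ a < s + 1 + (n - (s+1))
          then (if a < s ∧ a < s then f1 a s else f1 s a)
          else if b < a ∧ b < s then f1 b a else f1 a b) =
        pvMat n (fun a b => if b < a ∧ b < s + 1 then f1 b a else f1 a b) := by
      refine pvMat_congr (fun a b ha hb => ?_)
      by_cases h1 : b = s ∧ s + 1 ≤ a ∧ a < s + 1 + (n - (s+1))
      · obtain ⟨hbb, haa⟩ := h1
        subst hbb
        rw [if_pos ⟨rfl, haa⟩, if_neg (by omega), if_pos (by omega)]
      · rw [if_neg h1]
        by_cases h2 : b < a ∧ b < s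
        · rw [if_pos h2, if_pos ⟨h2.1, by omega⟩]
        · rw [if_neg h2, if_neg (by omega)]
    rw [heq, ih (s+1) (by omega)]
    exact pvMat_congr (fun a b _ _ => by rw [show s + 1 + k = s + (k+1) by omega])

theorem pvReplicate_eq_mat (n : Nat) :
    List.replicate n (List.replicate n (0 : Int)) = pvMat n (fun _ _ => 0) := by
  unfold pvMat
  rw [List.map_const', List.length_range, List.map_const', List.length_range]

-- ===== VERDICT (by name: the statement is the Claim_ definition above) =====
theorem convert_to_symmetric_matrix_spec : Claim_equal_convert_to_symmetric_matrix := by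
  intro input_array _ _
  unfold Spec_convert_to_symmetric_matrix
  simp only [convert_to_symmetric_matrix, convert_to_symmetric_matrix_alt]
  set n := input_array.length with hn
  set g : Nat → Nat → Int := fun a b => (input_array.getD b []).getD a 0 with hg
  rw [pvReplicate_eq_mat n]
  have h0 : pvMat n (fun _ _ => (0:Int)) =
      pvMat n (fun a b => if a < 0 ∧ a < b ∧ b < n then g a b else 0) :=
    pvMat_congr (fun a b _ _ => (if_neg (by omega)).symm)
  rw [h0, List.range_eq_range', pvLoop1_outer g n 0 (by omega)]
  set f1 : Nat → Nat → Int := fun a b => if a < 0 + n ∧ a < b ∧ b < n then g a b else 0 with hf1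
  have h1 : pvMat n f1 = pvMat n (fun a b => if b < a ∧ b < 0 then f1 b a else f1 a b) :=
    pvMat_congr (fun a b _ _ => (if_neg (by omega)).symm)
  rw [h1, pvLoop2_outer f1 n 0 (by omega), ← List.range_eq_range']
  unfold pvMat
  refine List.map_congr_left (fun a ha => ?_)
  refine List.map_congr_left (fun b hb => ?_)
  have ha' : a < n := List.mem_range.mp ha
  have hb' : b < n := List.mem_range.mp hb
  simp only [hf1, hg]
  rcases Nat.lt_trichotomy a b with h | h | h
  · rw [if_neg (by omega), if_pos ⟨by omega, h, hb'⟩, if_neg (by omega),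
      Nat.max_eq_right (by omega), Nat.min_eq_left (by omega)]
  · rw [if_neg (by omega), if_neg (by omega), if_pos h]
  · rw [if_pos ⟨h, by omega⟩, if_pos ⟨by omega, h, ha'⟩, if_neg (by omega),
      Nat.max_eq_left (by omega), Nat.min_eq_right (by omega)]
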